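-- pv_equiv track=rewrite | github.com/pypi-data/pypi-mirror-366 | packages/socialmapper/socialmapper-0.7.0-py3-none-any.whl/socialmapper/census/services/census_service.py | _group_geoids_by_state_and_county
-- ===== SOURCE A (Python) =====
-- def _group_geoids_by_state_and_county(
--     geoids: list[str]
-- ) -> dict[tuple[str, str], list[str]]:
--     """Group GEOIDs by state and county for more specific API calls."""
--     state_county_groups = {}
--
--     for geoid in geoids:
--         if len(geoid) >= 5:  # Need at least state (2) + county (3) digits
--             state_fips = geoid[:2]
--             county_fips = geoid[2:5]
--             key = (state_fips, county_fips)
--             if key not in state_county_groups: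
--                 state_county_groups[key] = []
--             state_county_groups[key].append(geoid)
--
--     return state_county_groups
-- ===== SOURCE B (Python) =====
-- def _group_geoids_by_state_and_county(
--     geoids: list[str]
-- ) -> dict[tuple[str, str], list[str]]:
--     """Group GEOIDs by state and county for more specific API calls."""
--     valid = [g for g in geoids if len(g) >= 5]
--     pre = [g[:5] for g in valid]
--     return {(p[:2], p[2:5]): [g for g, q in zip(valid, pre) if q == p]
--             for p in dict.fromkeys(pre)}
-- ===== Notes on version B (the rewrite author's own statement) =====
-- stated objective: alternative
-- what changed: Replaces the single-pass mutable-dict grouping (conditional bucket creation plus in-place append) with a filter, a precomputed 5-char-prefix list, an ordered prefix dedup (dict.fromkeys), and one zip-filter pass per distinct prefix, assembled as a dict comprehension.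
import Mathlib
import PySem

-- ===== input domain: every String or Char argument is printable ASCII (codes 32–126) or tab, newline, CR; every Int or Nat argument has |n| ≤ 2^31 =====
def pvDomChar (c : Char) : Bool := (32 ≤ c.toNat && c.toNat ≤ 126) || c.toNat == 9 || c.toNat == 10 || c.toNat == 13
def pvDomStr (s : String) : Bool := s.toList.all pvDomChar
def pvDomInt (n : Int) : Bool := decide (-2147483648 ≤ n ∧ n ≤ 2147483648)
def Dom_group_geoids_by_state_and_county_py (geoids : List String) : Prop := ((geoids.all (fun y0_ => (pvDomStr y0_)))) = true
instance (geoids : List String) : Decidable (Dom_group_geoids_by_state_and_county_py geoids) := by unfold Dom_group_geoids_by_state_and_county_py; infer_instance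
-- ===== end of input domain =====

-- B replaces A's single-pass mutable-dict grouping with filter + ordered key-dedup + one filter pass
-- per distinct key (objective: alternative decomposition, same return value).

-- ===== PORT A =====
-- one iteration of A's for-loop over the dict state
def pvStepA (d : PySem.Dict (String × String) (List String)) (geoid : String) :
    PySem.Dict (String × String) (List String) :=
  if 5 ≤ PySem.Str.len geoid then
    let state_fips := PySem.Str.slice geoid none (some 2)
    let county_fips := PySem.Str.slice geoid (some 2) (some 5)
    let key := (state_fips, county_fips)
    let d1 := if d.contains key then d else d.insert key ([] : List String)
    d1.modify key [] (fun v => v ++ [geoid])   -- state_county_groups[key].append(geoid)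
  else d

def group_geoids_by_state_and_county_py (geoids : List String) :
    List (String × String × List String) :=
  ((geoids.foldl pvStepA PySem.Dict.empty).items).map (fun p => (p.1.1, p.1.2, p.2))

-- ===== PORT B =====
-- B-side helpers: the 5-char prefix g[:5] and the key a prefix yields
def pvPreB (g : String) : String := PySem.Str.slice g none (some 5)

def group_geoids_by_state_and_county_py_alt (geoids : List String) :
    List (String × String × List String) :=
  let valid := geoids.filter (fun g => decide (5 ≤ PySem.Str.len g))
  let pre := valid.map pvPreB
  (PySem.List.dedup pre).map (fun p =>                       -- dict.fromkeys(pre)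
    (PySem.Str.slice p none (some 2), PySem.Str.slice p (some 2) (some 5),
     ((valid.zip pre).filter (fun q => q.2 == p)).map (fun q => q.1)))

-- ===== PRECONDITION & SPEC =====
def Spec_group_geoids_by_state_and_county_py (geoids : List String) (out : List (String × String × List String)) : Prop := out = group_geoids_by_state_and_county_py_alt geoids
instance (geoids : List String) (out : List (String × String × List String)) : Decidable (Spec_group_geoids_by_state_and_county_py geoids out) := by unfold Spec_group_geoids_by_state_and_county_py; infer_instance

-- ===== CLAIM (what is proved, stated in full; the proofs are below) =====
def Claim_equal_group_geoids_by_state_and_county_py : Prop := ∀ (geoids : List String), Dom_group_geoids_by_state_and_county_py geoids → Spec_group_geoids_by_state_and_county_py geoids (group_geoids_by_state_and_county_py geoids)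

-- ===== LEMMAS AND PROOFS =====

-- the key A computes for a geoid, and the key B computes from a prefix
def pvKeyB (g : String) : String × String :=
  (PySem.Str.slice g none (some 2), PySem.Str.slice g (some 2) (some 5))

def pvKeyOfPre (p : String) : String × String :=
  (PySem.Str.slice p none (some 2), PySem.Str.slice p (some 2) (some 5))

theorem pv_toList_slice2 (s : String) :
    (PySem.Str.slice s none (some 2)).toList = s.toList.take 2 := by
  rw [PySem.Str.toList_slice, PySem.Chars.slice,
    show ((2:Int) = ((2:Nat) : Int)) from rfl, PySem.List.slice_to_natCast]

theorem pv_toList_slice5 (s : String) :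
    (PySem.Str.slice s none (some 5)).toList = s.toList.take 5 := by
  rw [PySem.Str.toList_slice, PySem.Chars.slice,
    show ((5:Int) = ((5:Nat) : Int)) from rfl, PySem.List.slice_to_natCast]

theorem pv_toList_slice25 (s : String) :
    (PySem.Str.slice s (some 2) (some 5)).toList = (s.toList.drop 2).take 3 := by
  rw [PySem.Str.toList_slice, PySem.Chars.slice,
    show ((2:Int) = ((2:Nat) : Int)) from rfl, show ((5:Int) = ((5:Nat) : Int)) from rfl,
    PySem.List.slice_natCast]

-- A's key of g is B's key of g's 5-prefix
theorem pv_key_pre (g : String) : pvKeyB g = pvKeyOfPre (pvPreB g) := by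
  unfold pvKeyB pvKeyOfPre pvPreB
  refine Prod.ext ?_ ?_ <;> apply String.toList_injective
  · rw [pv_toList_slice2, pv_toList_slice2, pv_toList_slice5, List.take_take]; norm_num
  · rw [pv_toList_slice25, pv_toList_slice25, pv_toList_slice5, List.drop_take,
      List.take_take]; norm_num

-- on strings of length ≤ 5, the key determines the prefix
theorem pv_key_inj (p q : String) (hp : p.toList.length ≤ 5) (hq : q.toList.length ≤ 5)
    (h : pvKeyOfPre p = pvKeyOfPre q) : p = q := by
  unfold pvKeyOfPre at h
  obtain ⟨h1, h2⟩ := Prod.mk.injEq .. ▸ h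
  have e1 : p.toList.take 2 = q.toList.take 2 := by
    rw [← pv_toList_slice2, ← pv_toList_slice2, h1]
  have e2 : (p.toList.drop 2).take 3 = (q.toList.drop 2).take 3 := by
    rw [← pv_toList_slice25, ← pv_toList_slice25, h2]
  have d1 : p.toList.drop 2 = q.toList.drop 2 := by
    rwa [List.take_of_length_le (by rw [List.length_drop]; omega),
      List.take_of_length_le (by rw [List.length_drop]; omega)] at e2
  apply String.toList_injective
  rw [← List.take_append_drop 2 p.toList, ← List.take_append_drop 2 q.toList, e1, d1]

-- dedup commutes with an injective-on-the-list map
theorem pv_dedup_map (l : List String)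
    (hinj : ∀ a ∈ l, ∀ b ∈ l, pvKeyOfPre a = pvKeyOfPre b → a = b) :
    PySem.Set.ofList (l.map pvKeyOfPre) = (PySem.Set.ofList l).map pvKeyOfPre := by
  induction l using List.reverseRecOn with
  | nil => rfl
  | append_singleton xs x ih =>
    have hxs : ∀ a ∈ xs, ∀ b ∈ xs, pvKeyOfPre a = pvKeyOfPre b → a = b := by
      intro a ha b hb; exact hinj a (by simp [ha]) b (by simp [hb])
    rw [List.map_append, List.map_singleton, PySem.Set.ofList_append_singleton,
      PySem.Set.ofList_append_singleton, ih hxs]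
    by_cases hmem : x ∈ PySem.Set.ofList xs
    · have h1 : (PySem.Set.ofList xs).contains x = true := by
        simp only [PySem.Set.contains, List.contains_iff_mem]; exact hmem
      have h2 : PySem.Set.contains ((PySem.Set.ofList xs).map pvKeyOfPre) (pvKeyOfPre x) = true := by
        simp only [PySem.Set.contains, List.contains_iff_mem, List.mem_map]
        exact ⟨x, hmem, rfl⟩
      simp only [PySem.Set.add, h1, h2, if_true]
    · have h1 : (PySem.Set.ofList xs).contains x = false := by
        rw [Bool.eq_false_iff]
        simp only [ne_eq, PySem.Set.contains, List.contains_iff_mem]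
        exact hmem
      have h2 : PySem.Set.contains ((PySem.Set.ofList xs).map pvKeyOfPre) (pvKeyOfPre x) = false := by
        rw [Bool.eq_false_iff]
        simp only [ne_eq, PySem.Set.contains, List.contains_iff_mem, List.mem_map]
        intro ⟨a, ha, hk⟩
        have hax : a = x := by
          have ha' : a ∈ xs := (PySem.Set.mem_ofList xs a).mp ha
          exact hinj a (by simp [ha']) x (by simp) hk
        exact hmem (hax ▸ ha)
      simp only [PySem.Set.add, h1, h2, Bool.false_eq_true, if_false, List.map_append,
        List.map_singleton]

-- the zip-with-prefixes filter is a plain filter on the prefix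
theorem pv_zip_filter (l : List String) (p : String) :
    (((l.zip (l.map pvPreB)).filter (fun q => q.2 == p)).map (fun q => q.1)) =
      l.filter (fun g => pvPreB g == p) := by
  induction l with
  | nil => rfl
  | cons g gs ih =>
    simp only [List.map_cons, List.zip_cons_cons, List.filter_cons]
    by_cases h : pvPreB g == p
    · simp [h, ih]
    · simp only [h]; exact ih

-- every 5-prefix has length ≤ 5
theorem pv_pre_len (g : String) : (pvPreB g).toList.length ≤ 5 := by
  rw [pvPreB, pv_toList_slice5]; simp

-- inserting a fresh key with [] and then modifying it is the same as modifying directly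
theorem pv_insert_modify {κ : Type} [BEq κ] [LawfulBEq κ] {ν : Type}
    (d : PySem.Dict κ (List ν)) (k : κ) (f : List ν → List ν)
    (h : d.contains k = false) :
    (d.insert k ([] : List ν)).modify k [] f = d.modify k [] f := by
  unfold PySem.Dict.modify
  rw [PySem.Dict.getD_insert_self, PySem.Dict.insert_insert_self,
    PySem.Dict.getD_of_not_contains d [] h]

-- A's guarded step on a long-enough geoid is a plain modify
theorem pvStepA_eq_modify (d : PySem.Dict (String × String) (List String)) (g : String)
    (h : 5 ≤ PySem.Str.len g) :
    pvStepA d g = d.modify (pvKeyB g) [] (fun v => v ++ [g]) := by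
  unfold pvStepA pvKeyB
  rw [if_pos h]
  by_cases hc : d.contains (PySem.Str.slice g none (some 2), PySem.Str.slice g (some 2) (some 5)) = true
  · simp [hc]
  · simp only [Bool.not_eq_true] at hc
    simp [hc, pv_insert_modify _ _ _ hc]

-- the modify-fold over geoids is the pair-fold over (key, geoid) pairs
theorem pv_foldl_pairs (l : List String) (e : PySem.Dict (String × String) (List String)) :
    l.foldl (fun d g => d.modify (pvKeyB g) [] fun v => v ++ [g]) e =
      (l.map (fun g => (pvKeyB g, g))).foldl
        (fun d p => d.modify p.1 [] fun v => v ++ [p.2]) e := by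
  induction l generalizing e with
  | nil => rfl
  | cons g gs ih => simp [List.foldl_cons, ih]

-- A's fold equals the unguarded modify-fold over the filtered list
theorem pv_fold_filter (geoids : List String) (d : PySem.Dict (String × String) (List String)) :
    geoids.foldl pvStepA d =
      (geoids.filter (fun g => decide (5 ≤ PySem.Str.len g))).foldl
        (fun d g => d.modify (pvKeyB g) [] (fun v => v ++ [g])) d := by
  induction geoids generalizing d with
  | nil => rfl
  | cons g gs ih =>
    by_cases h : 5 ≤ PySem.Str.len g
    · rw [List.foldl_cons, pvStepA_eq_modify d g h, ih, List.filter_cons,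
        if_pos (decide_eq_true h), List.foldl_cons]
    · have this : pvStepA d g = d := by unfold pvStepA; rw [if_neg h]
      rw [List.foldl_cons, this, ih, List.filter_cons,
        if_neg (by simp [PySem.Str.len_eq] at h; simp; omega)]

theorem group_geoids_spec_aux (geoids : List String) :
    group_geoids_by_state_and_county_py geoids = group_geoids_by_state_and_county_py_alt geoids := by
  unfold group_geoids_by_state_and_county_py group_geoids_by_state_and_county_py_alt
  rw [pv_fold_filter]
  set valid := geoids.filter (fun g => decide (5 ≤ PySem.Str.len g)) with hvalid
  set D := valid.foldl (fun d g => d.modify (pvKeyB g) [] (fun v => v ++ [g]))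
      (PySem.Dict.empty : PySem.Dict (String × String) (List String)) with hD
  have hnodup : D.keys.Nodup := by
    rw [hD]
    exact PySem.Dict.nodup_keys_foldl_modify_key valid pvKeyB [] (fun _ g => (fun v => v ++ [g])) _
      (by simp [PySem.Dict.keys_empty])
  have hinj : ∀ a ∈ valid.map pvPreB, ∀ b ∈ valid.map pvPreB,
      pvKeyOfPre a = pvKeyOfPre b → a = b := by
    intro a ha b hb h
    obtain ⟨ga, _, rfl⟩ := List.mem_map.mp ha
    obtain ⟨gb, _, rfl⟩ := List.mem_map.mp hb
    exact pv_key_inj _ _ (pv_pre_len ga) (pv_pre_len gb) h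
  have hkeys : D.keys = (PySem.List.dedup (valid.map pvPreB)).map pvKeyOfPre := by
    rw [hD, PySem.Dict.keys_foldl_modify_key valid pvKeyB [] (fun _ g => (fun v => v ++ [g]))]
    rw [PySem.Dict.keys_empty, PySem.Set.update_nil_left, PySem.List.dedup_eq_ofList]
    rw [show valid.map pvKeyB = (valid.map pvPreB).map pvKeyOfPre by
      rw [List.map_map]; exact List.map_congr_left (fun g _ => pv_key_pre g)]
    exact pv_dedup_map _ hinj
  have hget : ∀ k, D.getD k [] = valid.filter (fun g => pvKeyB g == k) := by
    intro k
    rw [hD, pv_foldl_pairs, PySem.Dict.getD_foldl_modify_append]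
    simp [PySem.Dict.getD_empty, List.filter_map, Function.comp_def]
  rw [PySem.Dict.items_eq_map_keys D hnodup [], hkeys, List.map_map, List.map_map]
  apply List.map_congr_left
  intro p hp
  have hplen : p.toList.length ≤ 5 := by
    have hmem : p ∈ valid.map pvPreB :=
      (PySem.Set.mem_ofList _ _).mp (by rwa [PySem.List.dedup_eq_ofList] at hp)
    obtain ⟨g, _, rfl⟩ := List.mem_map.mp hmem
    exact pv_pre_len g
  have hfilter : valid.filter (fun g => pvKeyB g == pvKeyOfPre p) =
      valid.filter (fun g => pvPreB g == p) := by
    apply List.filter_congr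
    intro g _
    rw [Bool.eq_iff_iff]
    simp only [beq_iff_eq]
    constructor
    · intro h
      exact pv_key_inj _ _ (pv_pre_len g) hplen (by rw [← pv_key_pre, h])
    · intro h; rw [pv_key_pre, h]
  simp only [Function.comp_def, hget, pvKeyOfPre]
  rw [show ((PySem.Str.slice p none (some 2), PySem.Str.slice p (some 2) (some 5)) :
      String × String) = pvKeyOfPre p from rfl, hfilter, ← pv_zip_filter]

-- ===== VERDICT (by name: the statement is the Claim_ definition above) =====
theorem group_geoids_by_state_and_county_py_spec : Claim_equal_group_geoids_by_state_and_county_py := by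
  intro geoids _
  unfold Spec_group_geoids_by_state_and_county_py
  exact group_geoids_spec_aux geoids
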